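-- pv_equiv track=rewrite | github.com/minolee/trainer | src/utils/node.py | parse_nodelist
-- ===== SOURCE A (Python) =====
-- def parse_nodelist(nodelist: str) -> list:
--     """
--     Slurm의 nodelist 문자열을 파싱하여 실제 노드 이름 리스트로 반환합니다.
--     (ChatGPT generated)
--
--     예제:
--         "node[01-03,05]" → ["node01", "node02", "node03", "node05"]
--         "node[001-003]-gpu" → ["node001-gpu", "node002-gpu", "node003-gpu"]
--         "nodeA,nodeB,node[1-2]" → ["nodeA", "nodeB", "node1", "node2"]
--
--     Args:
--         nodelist (str): 파싱할 nodelist 문자열.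
--
--     Returns:
--         list: 확장된 노드 이름들의 리스트.
--     """
--
--     def split_top_level(s: str) -> list:
--         """
--         괄호 안의 콤마는 무시하고 top-level에서만 콤마로 문자열을 분리합니다.
--         """
--         parts = []
--         current = []
--         depth = 0
--         for char in s:
--             if char == '[':
--                 depth += 1
--                 current.append(char)
--             elif char == ']':
--                 depth -= 1
--                 current.append(char)
--             elif char == ',' and depth == 0:
--                 parts.append(''.join(current))
--                 current = []
--             else:
--                 current.append(char)
--         if current:
--             parts.append(''.join(current))
--         return parts
--
--     def expand(expr: str) -> list:
--         """
--         expr에 괄호 확장이 있다면 재귀적으로 확장하여 모든 조합을 반환합니다.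
--         """
--         # 더 이상 확장할 괄호가 없으면 그대로 반환.
--         if '[' not in expr:
--             return [expr]
--
--         # 가장 왼쪽의 '['를 찾아서, 그에 대응하는 ']' 위치를 찾음.
--         i = expr.find('[')
--         depth = 0
--         for j in range(i, len(expr)):
--             if expr[j] == '[':
--                 depth += 1
--             elif expr[j] == ']':
--                 depth -= 1
--                 if depth == 0:
--                     break
--         else:
--             raise ValueError("Unmatched '[' in expression: " + expr)
--
--         # expr는 "prefix[inside]suffix" 형태로 가정.
--         prefix = expr[:i]
--         inside = expr[i + 1 : j]
--         suffix = expr[j + 1 :]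
--
--         result = []
--         # inside 내부의 항목들은 콤마로 구분되어 있다.
--         for part in inside.split(','):
--             # part가 범위 (예: "01-03")인지 혹은 단일 값 (예: "05")인지 확인.
--             if '-' in part:
--                 start_str, end_str = part.split('-', 1)
--                 try:
--                     start = int(start_str)
--                     end = int(end_str)
--                 except ValueError:
--                     # 만약 숫자가 아니면 그냥 그대로 처리합니다.
--                     values = [part]
--                 else:
--                     width = len(start_str)  # 숫자의 자릿수를 유지하기 위함.
--                     values = [str(n).zfill(width) for n in range(start, end + 1)]
--             else:
--                 values = [part]
--
--             for value in values:
--                 # 접미사(suffix)에 괄호가 있을 수 있으므로 재귀 호출.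
--                 for tail in expand(suffix):
--                     result.append(prefix + value + tail)
--         return result
--
--     final_nodes = []
--     # nodelist 전체를 top-level 콤마 기준으로 분리한 후 각각 확장.
--     for part in split_top_level(nodelist):
--         final_nodes.extend(expand(part))
--     return final_nodes
-- ===== SOURCE B (Python) =====
-- def parse_nodelist(nodelist: str) -> list:
--     """Staged re-implementation: split recursively at top-level commas, decompose each
--     part into ordered option slots, then build the names as a cartesian product folded
--     back-to-front (no suffix re-expansion recursion)."""
--
--     def split_top_level(s: str) -> list:
--         depth = 0
--         for k, ch in enumerate(s):
--             if ch == '[':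
--                 depth += 1
--             elif ch == ']':
--                 depth -= 1
--             elif ch == ',' and depth == 0:
--                 return [s[:k]] + split_top_level(s[k + 1:])
--         return [s] if s else []
--
--     def item_values(item: str) -> list:
--         if '-' not in item:
--             return [item]
--         start_str, end_str = item.split('-', 1)
--         try:
--             lo, hi = int(start_str), int(end_str)
--         except ValueError:
--             return [item]
--         return [str(n).zfill(len(start_str)) for n in range(lo, hi + 1)]
--
--     def to_slots(part: str) -> list:
--         i = part.find('[')
--         if i < 0:
--             return [[part]]
--         j, depth = i + 1, 1
--         while j < len(part) and depth:
--             if part[j] == '[':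
--                 depth += 1
--             elif part[j] == ']':
--                 depth -= 1
--             j += 1
--         if depth:
--             raise ValueError("Unmatched '[' in expression: " + part)
--         options = [v for item in part[i + 1:j - 1].split(',') for v in item_values(item)]
--         return [[part[:i] + opt for opt in options]] + to_slots(part[j:])
--
--     def expand(part: str) -> list:
--         names = ['']
--         for slot in reversed(to_slots(part)):
--             names = [opt + name for opt in slot for name in names]
--         return names
--
--     return [name for part in split_top_level(nodelist) for name in expand(part)]
-- ===== Notes on version B (the rewrite author's own statement) =====
-- stated objective: alternative
-- what changed: Replaced A's accumulator-based top-level split and suffix-recursive bracket expansion by a recursive first-comma split plus a staged pass that decomposes each part into ordered option slots and folds their cartesian product back-to-front.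
import Mathlib
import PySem

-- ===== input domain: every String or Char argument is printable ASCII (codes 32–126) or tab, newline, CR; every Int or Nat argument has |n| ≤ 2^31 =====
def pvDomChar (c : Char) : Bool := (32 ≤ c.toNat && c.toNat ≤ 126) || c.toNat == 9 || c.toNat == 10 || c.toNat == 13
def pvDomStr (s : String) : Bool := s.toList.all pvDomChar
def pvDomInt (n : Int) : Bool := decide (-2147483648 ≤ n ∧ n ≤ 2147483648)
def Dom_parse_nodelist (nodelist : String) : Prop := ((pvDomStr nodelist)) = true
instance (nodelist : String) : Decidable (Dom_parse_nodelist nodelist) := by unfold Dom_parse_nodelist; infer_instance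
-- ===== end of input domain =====

-- B replaces A's suffix-recursion by a staged pass: recursive top-level comma split,
-- then each part is decomposed into ordered option slots whose cartesian product is
-- folded back-to-front (alternative decomposition, same cost).


-- ===== PORT A =====

-- A's split_top_level: loop over the characters with (parts, current, depth) state
def aSplitGo : List Char → List (List Char) → List Char → Int → List (List Char)
  | [], parts, current, _ => if current.isEmpty then parts else parts ++ [current]
  | c :: rest, parts, current, depth =>
    if c = '[' then aSplitGo rest parts (current ++ [c]) (depth + 1)
    else if c = ']' then aSplitGo rest parts (current ++ [c]) (depth - 1)
    else if c = ',' ∧ depth = 0 then aSplitGo rest (parts ++ [current]) [] depth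
    else aSplitGo rest parts (current ++ [c]) depth

-- A's 'for j in range(i, len(expr))' matching scan; `none` = the for-else raise
def aFindClose : List Char → Nat → Int → Option Nat
  | [], _, _ => none
  | c :: rest, j, depth =>
    if c = '[' then aFindClose rest (j + 1) (depth + 1)
    else if c = ']' then
      (if depth - 1 = 0 then some j else aFindClose rest (j + 1) (depth - 1))
    else aFindClose rest (j + 1) depth

-- the body of A's 'if '-' in part' branch computing `values`
def aValues (part : List Char) : List (List Char) :=
  if PySem.Chars.isIn ['-'] part then
    match PySem.Chars.splitOnMax part ['-'] 1 with
    | [start_str, end_str] =>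
      match PySem.Int.ofChars? start_str, PySem.Int.ofChars? end_str with
      | some start, some «end» =>
        (PySem.List.pyRange start («end» + 1) 1).map
          (fun n => PySem.Chars.zfill (PySem.Int.toChars n) (start_str.length : Int))
      | _, _ => [part]
    | _ => [part]  -- unreachable: '-' ∈ part gives exactly two pieces
  else [part]

def aExpand (expr : List Char) : List (List Char) :=
  if hin : PySem.Chars.isIn ['['] expr = false then [expr]
  else
    -- i = expr.find('['); nonnegative here since '[' is in expr
    let i : Nat := (PySem.Chars.find expr ['[']).toNat
    match aFindClose (expr.drop i) i 0 with
    | none => []  -- Python raises ValueError here (outside Pre_)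
    | some j =>
      let pre := expr.take i
      let inside := (expr.drop (i + 1)).take (j - (i + 1))  -- expr[i+1:j]
      let suffix := expr.drop (j + 1)
      (PySem.Chars.splitOn inside [',']).foldl
        (fun res part =>
          (aValues part).foldl
            (fun res v =>
              (aExpand suffix).foldl (fun res tail => res ++ [pre ++ v ++ tail]) res)
            res)
        []
termination_by expr.length
decreasing_by
  have hintrue : PySem.Chars.isIn ['['] expr = true := by
    revert hin; cases PySem.Chars.isIn ['['] expr <;> simp
  have hlen : 1 ≤ expr.length := by
    simpa using ((PySem.Chars.isIn_iff_infix _ _).mp hintrue).length_le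
  simp [List.length_drop]
  omega

def parse_nodelist (nodelist : String) : List String :=
  ((aSplitGo nodelist.toList [] [] 0).foldl (fun acc part => acc ++ aExpand part) []).map
    (fun cs => String.ofList cs)

-- ===== PORT B =====

-- B's split_top_level scan: index of the first comma at bracket depth 0 ('for k, ch in enumerate')
def bFindComma : List Char → Int → Option Nat
  | [], _ => none
  | ch :: rest, depth =>
    if ch = '[' then (bFindComma rest (depth + 1)).map (· + 1)
    else if ch = ']' then (bFindComma rest (depth - 1)).map (· + 1)
    else if ch = ',' ∧ depth = 0 then some 0
    else (bFindComma rest depth).map (· + 1)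

-- termination fact for bSplit, cited by name in its decreasing_by
theorem bFindComma_lt : ∀ (cs : List Char) (d : Int) (k : Nat), bFindComma cs d = some k → k < cs.length := by
  intro cs
  induction cs with
  | nil => intro d k h; simp [bFindComma] at h
  | cons c rest ih =>
    intro d k h
    simp only [bFindComma] at h
    split_ifs at h with h1 h2 h3
    · cases hk : bFindComma rest (d + 1) with
      | none => rw [hk] at h; simp at h
      | some m => rw [hk] at h; simp at h; have := ih _ _ hk; simp; omega
    · cases hk : bFindComma rest (d - 1) with
      | none => rw [hk] at h; simp at h
      | some m => rw [hk] at h; simp at h; have := ih _ _ hk; simp; omega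
    · simp at h; simp; omega
    · cases hk : bFindComma rest d with
      | none => rw [hk] at h; simp at h
      | some m => rw [hk] at h; simp at h; have := ih _ _ hk; simp; omega

-- B's split_top_level: '[s[:k]] + split_top_level(s[k+1:])' recursion
def bSplit (s : List Char) : List (List Char) :=
  match h : bFindComma s 0 with
  | none => if s = [] then [] else [s]
  | some k => s.take k :: bSplit (s.drop (k + 1))
termination_by s.length
decreasing_by
  have := bFindComma_lt s 0 k h
  simp [List.length_drop]
  omega

-- B's item_values (early-return decomposition of A's values computation)
def bItemValues (item : List Char) : List (List Char) :=
  if PySem.Chars.isIn ['-'] item = false then [item]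
  else
    match PySem.Chars.splitOnMax item ['-'] 1 with
    | [start_str, end_str] =>
      match PySem.Int.ofChars? start_str, PySem.Int.ofChars? end_str with
      | some lo, some hi =>
        (PySem.List.pyRange lo (hi + 1) 1).map
          (fun n => PySem.Chars.zfill (PySem.Int.toChars n) (start_str.length : Int))
      | _, _ => [item]
    | _ => [item]  -- unreachable: '-' ∈ item gives exactly two pieces
  -- exact: split('-', 1) with '-' present

-- B's 'while j < len(part) and depth' scan, over part[i+1:]; returns the number of
-- characters consumed (python's j = i+1+result); `none` = the 'if depth: raise'
def bMatch (cs : List Char) (depth : Int) : Option Nat :=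
  if depth = 0 then some 0
  else
    match cs with
    | [] => none
    | c :: rest =>
      (bMatch rest (if c = '[' then depth + 1 else if c = ']' then depth - 1 else depth)).map (· + 1)
termination_by cs.length

-- B's to_slots: decompose a part into ordered option slots
def bSlots (part : List Char) : Option (List (List (List Char))) :=
  let i := PySem.Chars.find part ['[']
  if i < 0 then some [[part]]
  else
    match bMatch (part.drop (i.toNat + 1)) 1 with
    | none => none  -- Python raises ValueError here (outside Pre_)
    | some m =>
      let options := (PySem.Chars.splitOn ((part.drop (i.toNat + 1)).take (m - 1)) [',']).flatMap bItemValues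
      (bSlots (part.drop (i.toNat + 1 + m))).map
        (fun slots => options.map (fun opt => part.take i.toNat ++ opt) :: slots)
termination_by part.length
decreasing_by
  have hfind : 0 ≤ PySem.Chars.find part ['['] := by omega
  have hlen : 1 ≤ part.length := by
    simpa using ((PySem.Chars.find_nonneg_iff _ _).mp hfind).length_le
  simp [List.length_drop]
  omega

-- B's expand: cartesian product of the slots, folded over reversed(slots)
def bExpand (part : List Char) : List (List Char) :=
  match bSlots part with
  | none => []  -- Python raises ValueError here (outside Pre_)
  | some slots =>
    slots.reverse.foldl (fun names slot => slot.flatMap (fun opt => names.map (opt ++ ·))) [[]]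

def parse_nodelist_alt (nodelist : String) : List String :=
  ((bSplit nodelist.toList).flatMap bExpand).map (fun cs => String.ofList cs)

-- ===== PRECONDITION & SPEC =====

-- Pre_ excludes exactly the inputs on which A raises ValueError: a '[' that is never
-- closed inside its own top-level comma-separated piece.  `d` is the raw depth used
-- for the top-level comma split, `c` the clamped open-bracket count of the current piece.
def preGo : List Char → Int → Nat → Bool
  | [], _, c => c == 0
  | ch :: rest, d, c =>
    if ch = '[' then preGo rest (d + 1) (c + 1)
    else if ch = ']' then preGo rest (d - 1) (c - 1)
    else if ch = ',' ∧ d = 0 then c == 0 && preGo rest 0 0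
    else preGo rest d c

def Pre_parse_nodelist (nodelist : String) : Prop := preGo nodelist.toList 0 0 = true
instance (nodelist : String) : Decidable (Pre_parse_nodelist nodelist) := by
  unfold Pre_parse_nodelist; infer_instance

def pvWitness_parse_nodelist : String := "node[01-03,05],node[1-2]-gpu"

def Spec_parse_nodelist (nodelist : String) (out : List String) : Prop := out = parse_nodelist_alt nodelist
instance (nodelist : String) (out : List String) : Decidable (Spec_parse_nodelist nodelist out) := by unfold Spec_parse_nodelist; infer_instance

-- ===== CLAIM (what is proved, stated in full; the proofs are below) =====
def Claim_equal_parse_nodelist : Prop := ∀ (nodelist : String), Dom_parse_nodelist nodelist → Pre_parse_nodelist nodelist → Spec_parse_nodelist nodelist (parse_nodelist nodelist)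

-- ===== LEMMAS AND PROOFS =====

theorem values_eq : aValues = bItemValues := by
  funext item
  unfold aValues bItemValues
  cases PySem.Chars.isIn ['-'] item <;> simp

-- accumulator lemma for A's split loop
theorem aSplitGo_acc : ∀ (cs : List Char) (parts : List (List Char)) (cur : List Char) (d : Int),
    aSplitGo cs parts cur d = parts ++ aSplitGo cs [] cur d := by
  intro cs
  induction cs with
  | nil => intro parts cur d; simp only [aSplitGo]; split_ifs <;> simp
  | cons c rest ih =>
    intro parts cur d
    simp only [aSplitGo]
    split_ifs
    · rw [ih, ih [] (cur ++ [c])]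
    · rw [ih, ih [] (cur ++ [c])]
    · rw [ih]; conv_rhs => rw [List.nil_append, ih [cur]]
      simp
    · rw [ih, ih [] (cur ++ [c])]

-- A's split loop characterised through B's first-comma scan
theorem aSplitGo_findComma : ∀ (cs : List Char) (cur : List Char) (d : Int),
    aSplitGo cs [] cur d =
      match bFindComma cs d with
      | none => if cur ++ cs = [] then [] else [cur ++ cs]
      | some k => (cur ++ cs.take k) :: aSplitGo (cs.drop (k + 1)) [] [] 0 := by
  intro cs
  induction cs with
  | nil =>
    intro cur d
    simp only [aSplitGo, bFindComma, List.append_nil]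
    cases cur <;> simp
  | cons c rest ih =>
    intro cur d
    by_cases h1 : c = '['
    · subst h1
      simp only [aSplitGo, bFindComma]
      rw [ih]
      cases hk : bFindComma rest (d + 1) <;>
        simp [List.append_assoc, List.take_succ_cons, List.drop_succ_cons]
    · by_cases h2 : c = ']'
      · subst h2
        simp only [aSplitGo, bFindComma, if_neg (by decide : ¬ (']' = '['))]
        rw [ih]
        cases hk : bFindComma rest (d - 1) <;>
          simp [List.append_assoc, List.take_succ_cons, List.drop_succ_cons]
      · by_cases h3 : c = ',' ∧ d = 0
        · obtain ⟨hc, hd⟩ := h3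
          subst hc; subst hd
          simp only [aSplitGo, bFindComma, if_neg (by decide : ¬ (',' = '[')),
            if_neg (by decide : ¬ (',' = ']'))]
          rw [aSplitGo_acc]
          simp
        · simp only [aSplitGo, bFindComma, if_neg h1, if_neg h2, if_neg h3]
          rw [ih]
          cases hk : bFindComma rest d <;>
            simp [List.append_assoc, List.take_succ_cons, List.drop_succ_cons]

theorem bSplit_eq : ∀ (n : Nat) (s : List Char), s.length < n → bSplit s = aSplitGo s [] [] 0 := by
  intro n
  induction n with
  | zero => intro s h; omega
  | succ n ih =>
    intro s hlen
    rw [bSplit, aSplitGo_findComma]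
    cases hk : bFindComma s 0 with
    | none => simp
    | some k =>
      have hklt := bFindComma_lt s 0 k hk
      have : (s.drop (k + 1)).length < n := by simp [List.length_drop]; omega
      simp [ih _ this]

-- every successful bMatch with nonzero depth consumes at least one character
theorem bMatch_pos (cs : List Char) (d : Int) (m : Nat) (hd : d ≠ 0) (hm : bMatch cs d = some m) :
    1 ≤ m := by
  rw [bMatch.eq_def, if_neg hd] at hm
  cases cs with
  | nil => simp at hm
  | cons a b =>
    simp only at hm
    obtain ⟨k, -, rfl⟩ := Option.map_eq_some_iff.mp hm
    omega

-- A's matching scan expressed through B's consumed-count scan (for depth ≥ 1)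
theorem findClose_eq_match : ∀ (cs : List Char) (j : Nat) (d : Int), 1 ≤ d →
    aFindClose cs j d = (bMatch cs d).map (fun m => j + m - 1) := by
  intro cs
  induction cs with
  | nil =>
    intro j d hd
    rw [bMatch.eq_def, if_neg (by omega : ¬ d = 0)]
    simp [aFindClose]
  | cons c rest ih =>
    intro j d hd
    rw [bMatch.eq_def, if_neg (by omega : ¬ d = 0)]
    simp only [aFindClose]
    by_cases h1 : c = '['
    · subst h1
      simp only [Char.reduceEq, reduceIte]
      rw [ih _ _ (by omega)]
      cases hm : bMatch rest (d + 1) with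
      | none => simp
      | some m =>
        have := bMatch_pos rest (d + 1) m (by omega) hm
        simp
    · by_cases h2 : c = ']'
      · subst h2
        simp only [Char.reduceEq, reduceIte]
        by_cases hz : d - 1 = 0
        · rw [if_pos hz, bMatch.eq_def, if_pos hz]
          simp
        · rw [if_neg hz, ih _ _ (by omega)]
          cases hm : bMatch rest (d - 1) with
          | none => simp
          | some m =>
            have := bMatch_pos rest (d - 1) m hz hm
            simp
      · simp only [if_neg h1, if_neg h2]
        rw [ih _ _ hd]
        cases hm : bMatch rest d with
        | none => simp
        | some m =>
          have := bMatch_pos rest d m (by omega) hm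
          simp

-- one step of B's reversed-fold cartesian product
theorem prodFold_cons (x : List (List Char)) (ss : List (List (List Char))) :
    (x :: ss).reverse.foldl (fun names slot => slot.flatMap (fun opt => names.map (opt ++ ·))) [[]]
      = x.flatMap (fun opt =>
          (ss.reverse.foldl (fun names slot => slot.flatMap (fun opt => names.map (opt ++ ·))) [[]]).map (opt ++ ·)) := by
  simp [List.foldl_append]

theorem expand_eq : ∀ (n : Nat) (part : List Char), part.length < n → bExpand part = aExpand part := by
  intro n
  induction n with
  | zero => intro part h; omega
  | succ n ih =>
    intro part hlen
    rw [bExpand, bSlots, aExpand]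
    by_cases hin : PySem.Chars.isIn ['['] part = false
    · have hneg : PySem.Chars.find part ['['] = -1 := by
        rw [PySem.Chars.find_eq_neg_one_iff]
        exact (PySem.Chars.isIn_eq_false_iff _ _).mp hin
      simp [hin, hneg]
    · have hintrue : PySem.Chars.isIn ['['] part = true := by
        revert hin; cases PySem.Chars.isIn ['['] part <;> simp
    -- find ≥ 0 and part[i] = '['
      have hinf : ['['] <:+: part := (PySem.Chars.isIn_iff_infix _ _).mp hintrue
      have hfind : 0 ≤ PySem.Chars.find part ['['] := (PySem.Chars.find_nonneg_iff _ _).mpr hinf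
      have hne : part.length ≠ 0 := by
        intro h
        exact absurd (List.IsInfix.length_le hinf) (by simp [h])
      have hpre : ['['] <+: part.drop (PySem.Chars.find part ['[']).toNat :=
        (PySem.Chars.find_spec hfind).1
      set i : Nat := (PySem.Chars.find part ['[']).toNat with hi
      have hdropi : part.drop i = '[' :: part.drop (i + 1) := by
        obtain ⟨t, ht⟩ := hpre
        have htail : (part.drop i).tail = part.drop (i + 1) := by
          rw [← List.drop_drop]
          cases hd : part.drop i <;> simp
        rw [← ht, List.cons_append, List.nil_append] at htail ⊢
        simp at htail
        rw [htail]
      simp only [dif_neg hin, if_neg (by omega : ¬ PySem.Chars.find part ['['] < 0)]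
      rw [hdropi]
      simp only [aFindClose, Char.reduceEq, reduceIte]
      rw [findClose_eq_match _ _ _ (by omega), show (0 : Int) + 1 = 1 from by norm_num]
      cases hm : bMatch (part.drop (i + 1)) 1 with
      | none => simp
      | some m =>
        have hm1 : 1 ≤ m := bMatch_pos _ _ _ (by norm_num) hm
        simp only [Option.map_some]
        have hj : i + 1 + m - 1 = i + m := by omega
        rw [hj]
        have hsub : i + m - (i + 1) = m - 1 := by omega
        have hsuf : i + m + 1 = i + 1 + m := by omega
        have hsuflen : (part.drop (i + 1 + m)).length < n := by
          simp [List.length_drop]; omega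
        have hA : aExpand (part.drop (i + 1 + m)) = bExpand (part.drop (i + 1 + m)) :=
          (ih _ hsuflen).symm
        simp only [hsub, hsuf, hA]
        cases hs : bSlots (part.drop (i + 1 + m)) with
        | none =>
          have hB : bExpand (part.drop (i + 1 + m)) = [] := by
            rw [bExpand, hs]
          simp [hB]
        | some slots' =>
          have hB : bExpand (part.drop (i + 1 + m))
              = slots'.reverse.foldl
                  (fun names slot => slot.flatMap (fun opt => names.map (opt ++ ·))) [[]] := by
            rw [bExpand, hs]
          simp only [Option.map_some]
          rw [prodFold_cons, ← hB]
          simp only [PySem.List.foldl_append_singleton_eq_map,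
            PySem.List.foldl_append_eq_flatMap, List.nil_append, values_eq]
          simp [List.flatMap_assoc, List.flatMap_map, List.append_assoc]
          simp only [← List.append_assoc]

-- ===== VERDICT (by name: the statement is the Claim_ definition above) =====
theorem parse_nodelist_spec : Claim_equal_parse_nodelist := by
  intro nodelist _ _
  unfold Spec_parse_nodelist parse_nodelist parse_nodelist_alt
  rw [bSplit_eq (nodelist.toList.length + 1) _ (by omega)]
  rw [PySem.List.foldl_append_eq_flatMap]
  simp only [List.nil_append]
  congr 1
  apply List.flatMap_congr
  intro part _
  rw [expand_eq (part.length + 1) _ (by omega)]
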